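-- pv_equiv track=rewrite | github.com/MrBrantCode/unitest_baseline | mut_generate/mist_train_cf/cf_1333/solution.py | last_three_elements
-- ===== SOURCE A (Python) =====
-- def last_three_elements(nums):
--     """
--     This function checks the last three elements of a list and returns them if their sum is greater than 10,
--     their product is divisible by 5, and all three elements are prime numbers.
--
--     Args:
--     nums (list): A list of integers.
--
--     Returns:
--     list: The last three elements of the list if they meet the conditions, otherwise None.
--     """
--
--     # Check if the list has at least three elements
--     if len(nums) < 3:
--         return None
--
--     # Get the last three elements of the list
--     last_three = nums[-3:]
--
--     # Function to check if a number is prime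
--     def is_prime(n):
--         """Check if a number is prime."""
--         if n < 2:
--             return False
--         for i in range(2, int(n**0.5) + 1):
--             if n % i == 0:
--                 return False
--         return True
--
--     # Check if all elements are prime
--     if not all(is_prime(num) for num in last_three):
--         return None
--
--     # Check if the sum of the last three elements is greater than 10
--     if sum(last_three) <= 10:
--         return None
--
--     # Check if the product of the last three elements is divisible by 5
--     if (last_three[0] * last_three[1] * last_three[2]) % 5 != 0:
--         return None
--
--     # If all conditions are met, return the last three elements
--     return last_three
-- ===== SOURCE B (Python) =====
-- def last_three_elements(nums):
--     if len(nums) < 3: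
--         return None
--     tail = nums[-3:]
--     # Among three primes the product is divisible by 5 exactly when 5 itself occurs,
--     # so the product check collapses to a membership test, done before any primality work.
--     if 5 not in tail or sum(tail) <= 10:
--         return None
--     for n in tail:
--         if n < 2 or any(n % d == 0 for d in range(2, n)):
--             return None
--     return tail
-- ===== Notes on version B (the rewrite author's own statement) =====
-- stated objective: faster
-- what changed: The product%5==0 test is replaced by the number-theoretic fact that a product of primes is divisible by 5 iff 5 is one of them, so B gates on '5 in tail' and the sum first and only then verifies primality, via an early-returning loop doing full-range trial division over range(2,n) instead of A's sqrt-bounded scan inside all().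
import Mathlib
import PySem

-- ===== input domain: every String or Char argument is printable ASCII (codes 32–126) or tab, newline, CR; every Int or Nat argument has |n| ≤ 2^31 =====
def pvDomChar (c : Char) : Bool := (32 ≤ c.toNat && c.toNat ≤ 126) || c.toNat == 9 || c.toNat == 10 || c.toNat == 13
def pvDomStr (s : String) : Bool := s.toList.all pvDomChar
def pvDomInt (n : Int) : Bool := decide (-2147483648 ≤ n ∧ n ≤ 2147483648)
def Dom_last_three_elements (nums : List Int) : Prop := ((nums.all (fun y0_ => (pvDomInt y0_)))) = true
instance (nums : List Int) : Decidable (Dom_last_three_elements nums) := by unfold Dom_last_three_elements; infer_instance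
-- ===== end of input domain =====

-- B replaces A's product-mod-5 check by membership of 5 in the tail (a product of primes is
-- divisible by 5 iff 5 occurs), gates on that and the sum before any primality work, and tests
-- primality by full-range trial division in an early-returning loop, so no per-element work happens unless 5 occurs in the tail.

-- ===== PORT A =====
-- is_prime: for 0 ≤ n ≤ 2^31, int(n**0.5) = Nat.sqrt n.toNat exactly (double sqrt is correctly
-- rounded and the distance from sqrt(n) to the nearest integer exceeds the rounding error there).
def pvIsPrimeA (n : Int) : Bool :=
  if n < 2 then false
  else (PySem.List.pyRange 2 ((Nat.sqrt n.toNat : Int) + 1) 1).all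
         (fun i => !(PySem.Int.mod n i == 0))

def last_three_elements (nums : List Int) : Option (List Int) :=
  if PySem.List.len nums < 3 then none
  else
    let last_three := PySem.List.slice nums (some (-3)) none
    if !(last_three.all pvIsPrimeA) then none
    else if last_three.sum ≤ 10 then none
    else if PySem.Int.mod (PySem.List.pyGetD last_three 0 0 * PySem.List.pyGetD last_three 1 0 *
                           PySem.List.pyGetD last_three 2 0) 5 ≠ 0 then none
    else some last_three

-- ===== PORT B =====
-- Source B's per-element test 'n < 2 or any(n % d == 0 for d in range(2, n))'
def pvNotPrimeB (n : Int) : Bool :=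
  decide (n < 2) || (PySem.List.pyRange 2 n 1).any (fun d => PySem.Int.mod n d == 0)

-- Source B's 'for n in tail: if …: return None' loop followed by 'return tail'
def pvPrimeLoopB (tail : List Int) : List Int → Option (List Int)
  | [] => some tail
  | n :: rest => if pvNotPrimeB n then none else pvPrimeLoopB tail rest

def last_three_elements_alt (nums : List Int) : Option (List Int) :=
  if PySem.List.len nums < 3 then none
  else
    let tail := PySem.List.slice nums (some (-3)) none
    if !(tail.contains 5) || decide (tail.sum ≤ 10) then none
    else pvPrimeLoopB tail tail

-- ===== PRECONDITION & SPEC =====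
def Spec_last_three_elements (nums : List Int) (out : Option (List Int)) : Prop := out = last_three_elements_alt nums
instance (nums : List Int) (out : Option (List Int)) : Decidable (Spec_last_three_elements nums out) := by unfold Spec_last_three_elements; infer_instance

-- ===== CLAIM (what is proved, stated in full; the proofs are below) =====
def Claim_equal_last_three_elements : Prop := ∀ (nums : List Int), Dom_last_three_elements nums → Spec_last_three_elements nums (last_three_elements nums)

-- ===== LEMMAS AND PROOFS =====

-- A's scan of 2..int(sqrt n) finds no divisor iff n.toNat is prime (for n ≥ 2)
lemma pvIsPrimeA_iff (n : Int) (h2 : 2 ≤ n) : pvIsPrimeA n = true ↔ Nat.Prime n.toNat := by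
  have hm2 : 2 ≤ n.toNat := by omega
  rw [pvIsPrimeA, if_neg (by omega), List.all_eq_true, Nat.prime_def_le_sqrt]
  constructor
  · intro H
    refine ⟨hm2, fun k hk2 hks hkd => ?_⟩
    have hmem : (k : Int) ∈ PySem.List.pyRange 2 ((Nat.sqrt n.toNat : Int) + 1) 1 := by
      rw [PySem.List.mem_pyRange_one]
      constructor
      · exact_mod_cast hk2
      · omega
    have hh := H _ hmem
    simp only [Bool.not_eq_eq_eq_not, Bool.not_true, beq_eq_false_iff_ne, ne_eq] at hh
    apply hh
    rw [PySem.Int.mod_eq_zero_iff_dvd]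
    have hn : n = (n.toNat : Int) := by omega
    rw [hn]
    exact_mod_cast hkd
  · rintro ⟨-, H⟩ i hi
    rw [PySem.List.mem_pyRange_one] at hi
    simp only [Bool.not_eq_eq_eq_not, Bool.not_true, beq_eq_false_iff_ne, ne_eq]
    intro hmod
    rw [PySem.Int.mod_eq_zero_iff_dvd] at hmod
    refine H i.toNat (by omega) (by omega) ?_
    have hik : i = (i.toNat : Int) := by omega
    have hn : n = (n.toNat : Int) := by omega
    rw [hik, hn] at hmod
    exact_mod_cast hmod

-- B's full-range scan of 2..n-1 finds no divisor iff n.toNat is prime (for n ≥ 2)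
lemma pvNotPrimeB_iff (n : Int) (h2 : 2 ≤ n) : pvNotPrimeB n = false ↔ Nat.Prime n.toNat := by
  have hm2 : 2 ≤ n.toNat := by omega
  have hn : n = (n.toNat : Int) := by omega
  rw [pvNotPrimeB, Bool.or_eq_false_iff, List.any_eq_false, Nat.prime_def_lt]
  constructor
  · rintro ⟨-, H⟩
    refine ⟨hm2, fun m hm hmd => ?_⟩
    by_contra hm1
    have hm0 : m ≠ 0 := fun h => by
      subst h
      exact absurd (Nat.eq_zero_of_zero_dvd hmd) (by omega)
    have hmem : (m : Int) ∈ PySem.List.pyRange 2 n 1 := by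
      rw [PySem.List.mem_pyRange_one]
      omega
    refine H _ hmem ?_
    rw [beq_iff_eq, PySem.Int.mod_eq_zero_iff_dvd, hn]
    exact_mod_cast hmd
  · rintro ⟨-, H⟩
    refine ⟨decide_eq_false (by omega), fun d hd => ?_⟩
    rw [PySem.List.mem_pyRange_one] at hd
    intro hmod
    rw [beq_iff_eq, PySem.Int.mod_eq_zero_iff_dvd] at hmod
    have hdvd : d.toNat ∣ n.toNat := by
      have hdi : d = (d.toNat : Int) := by omega
      rw [hdi, hn] at hmod
      exact_mod_cast hmod
    have := H d.toNat (by omega) hdvd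
    omega

-- a prime (as an integer ≥ 2) is divisible by 5 iff it equals 5
lemma prime_dvd5_iff (a : Int) (h2 : 2 ≤ a) (hp : Nat.Prime a.toNat) :
    (5 : Int) ∣ a ↔ a = 5 := by
  constructor
  · rintro ⟨k, rfl⟩
    have hk : 1 ≤ k := by nlinarith
    have h5 : 5 ∣ (5 * k).toNat := by
      refine ⟨k.toNat, ?_⟩
      omega
    rcases hp.eq_one_or_self_of_dvd 5 h5 with h | h
    · omega
    · omega
  · rintro rfl
    exact ⟨1, by ring⟩

-- for three primes a, b, c (≥ 2): 5 ∣ a*b*c iff one of them is 5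
lemma prod_mod5_iff (a b c : Int) (ha : 2 ≤ a) (hb : 2 ≤ b) (hc : 2 ≤ c)
    (hpa : Nat.Prime a.toNat) (hpb : Nat.Prime b.toNat) (hpc : Nat.Prime c.toNat) :
    PySem.Int.mod (a * b * c) 5 = 0 ↔ (a = 5 ∨ b = 5 ∨ c = 5) := by
  rw [PySem.Int.mod_eq_zero_iff_dvd]
  have h5p : Prime (5 : Int) := Int.prime_iff_natAbs_prime.mpr (by norm_num)
  rw [h5p.dvd_mul, h5p.dvd_mul, prime_dvd5_iff a ha hpa, prime_dvd5_iff b hb hpb,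
      prime_dvd5_iff c hc hpc]
  tauto

-- ===== VERDICT (by name: the statement is the Claim_ definition above) =====
theorem last_three_elements_spec : Claim_equal_last_three_elements := by
  intro nums _
  unfold Spec_last_three_elements last_three_elements last_three_elements_alt
  by_cases h3 : PySem.List.len nums < 3
  · rw [if_pos h3, if_pos h3]
  · rw [if_neg h3, if_neg h3]
    have hlen3 : 3 ≤ nums.length := by
      simp only [PySem.List.len_eq] at h3
      omega
    simp only [PySem.List.slice_from_neg_ofNat nums 3 (by omega)]
    rcases hmatch : nums.drop (nums.length - 3) with _ | ⟨a, _ | ⟨b, _ | ⟨c, _ | ⟨d, rest⟩⟩⟩⟩ <;>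
      (try (have hl := congrArg List.length hmatch; simp at hl; omega))
    have hg1 : PySem.List.pyGetD [a, b, c] 1 0 = b := by
      simp [PySem.List.pyGetD, PySem.List.pyGet?, PySem.List.pyIdx?]
    have hg2 : PySem.List.pyGetD [a, b, c] 2 0 = c := by
      simp [PySem.List.pyGetD, PySem.List.pyGet?, PySem.List.pyIdx?]
    simp only [List.all_cons, List.all_nil, List.sum_cons, List.sum_nil,
      PySem.List.pyGetD_zero_cons, hg1, hg2]
    have hcont : ([a, b, c].contains 5) = decide (5 = a ∨ 5 = b ∨ 5 = c) := by
      simp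
    rw [hcont]
    by_cases hall : pvIsPrimeA a = true ∧ pvIsPrimeA b = true ∧ pvIsPrimeA c = true
    · -- all three pass A's prime test
      obtain ⟨hPa, hPb, hPc⟩ := hall
      have ha2 : 2 ≤ a := by by_contra h; rw [pvIsPrimeA, if_pos (by omega)] at hPa; simp at hPa
      have hb2 : 2 ≤ b := by by_contra h; rw [pvIsPrimeA, if_pos (by omega)] at hPb; simp at hPb
      have hc2 : 2 ≤ c := by by_contra h; rw [pvIsPrimeA, if_pos (by omega)] at hPc; simp at hPc
      have hpa := (pvIsPrimeA_iff a ha2).mp hPa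
      have hpb := (pvIsPrimeA_iff b hb2).mp hPb
      have hpc := (pvIsPrimeA_iff c hc2).mp hPc
      have hna : pvNotPrimeB a = false := (pvNotPrimeB_iff a ha2).mpr hpa
      have hnb : pvNotPrimeB b = false := (pvNotPrimeB_iff b hb2).mpr hpb
      have hnc : pvNotPrimeB c = false := (pvNotPrimeB_iff c hc2).mpr hpc
      have hprod := prod_mod5_iff a b c ha2 hb2 hc2 hpa hpb hpc
      by_cases hs : a + (b + c) ≤ 10
      · simp [hPa, hPb, hPc, hs]
      · by_cases h5 : a = 5 ∨ b = 5 ∨ c = 5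
        · have hdvd : (5 : Int) ∣ a * b * c :=
            (PySem.Int.mod_eq_zero_iff_dvd _ _).mp (hprod.mpr h5)
          have hne : ¬(¬5 = a ∧ ¬5 = b ∧ ¬5 = c) := by tauto
          simp [hPa, hPb, hPc, hs, hne, hdvd, pvPrimeLoopB, hna, hnb, hnc]
        · have hnd : ¬ (5 : Int) ∣ a * b * c := fun h =>
            h5 (hprod.mp ((PySem.Int.mod_eq_zero_iff_dvd _ _).mpr h))
          have hne : ¬5 = a ∧ ¬5 = b ∧ ¬5 = c := by tauto
          simp [hPa, hPb, hPc, hs, hne, hnd]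
    · -- some element fails A's prime test: both sides return none
      have hfail : pvIsPrimeA a = false ∨ pvIsPrimeA b = false ∨ pvIsPrimeA c = false := by
        simp only [not_and_or, Bool.not_eq_true] at hall
        exact hall
      have keyB : ∀ x : Int, pvIsPrimeA x = false → pvNotPrimeB x = true := by
        intro x hx
        by_cases hx2 : 2 ≤ x
        · by_contra hB
          rw [Bool.not_eq_true] at hB
          exact absurd ((pvIsPrimeA_iff x hx2).mpr ((pvNotPrimeB_iff x hx2).mp hB))
            (by simp [hx])
        · rw [pvNotPrimeB, Bool.or_eq_true]
          left
          simp only [decide_eq_true_eq]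
          omega
      rw [if_pos (by rcases hfail with h | h | h <;> simp [h])]
      by_cases h5 : a = 5 ∨ b = 5 ∨ c = 5
      · by_cases hs : a + (b + c) ≤ 10
        · rw [if_pos (by simp [hs])]
        · rw [if_neg (by simp; omega)]
          rcases hfail with h | h | h <;> simp [pvPrimeLoopB, keyB _ h]
      · rw [if_pos (by simp; omega)]
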